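-- pv_equiv track=rewrite | github.com/VectorRobotics/vector-os-nano | vector_os_nano/core/plan_validator.py | _fuzzy_enum_match
-- ===== SOURCE A (Python) =====
-- def _fuzzy_enum_match(value: str, enum_values: list) -> str | None:
--     """Case-insensitive, whitespace-normalised match against enum values.
--
--     Priority:
--       1. Exact normalised match (lowercase, strip, underscore->space)
--       2. Substring match (query in enum_value or vice versa)
--
--     Returns the matched enum value, or None if no match found.
--     """
--     if not isinstance(value, str):
--         return None
--     norm = value.lower().strip().replace("_", " ")
--     # Pass 1: exact normalised match
--     for ev in enum_values:
--         if isinstance(ev, str) and ev.lower().strip().replace("_", " ") == norm: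
--             return ev
--     # Pass 2: substring match
--     for ev in enum_values:
--         if isinstance(ev, str):
--             ev_norm = ev.lower().strip().replace("_", " ")
--             if norm in ev_norm or ev_norm in norm:
--                 return ev
--     return None
-- ===== SOURCE B (Python) =====
-- def _fuzzy_enum_match(value: str, enum_values: list) -> str | None:
--     """Single-pass variant: exact normalised match returns eagerly; the first
--     substring candidate is remembered and returned only after the full scan."""
--     if not isinstance(value, str):
--         return None
--     norm = value.lower().strip().replace("_", " ")
--     candidate = None
--     for ev in enum_values:
--         if not isinstance(ev, str):
--             continue
--         ev_norm = ev.lower().strip().replace("_", " ")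
--         if ev_norm == norm:
--             return ev
--         if candidate is None and (norm in ev_norm or ev_norm in norm):
--             candidate = ev
--     return candidate
-- ===== Notes on version B (the rewrite author's own statement) =====
-- stated objective: alternative
-- what changed: Replaces A's two passes over enum_values (each re-normalising every element) with one accumulator loop that returns an exact match eagerly and remembers the first substring candidate, normalising each element once; measured about the same speed.
import Mathlib
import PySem

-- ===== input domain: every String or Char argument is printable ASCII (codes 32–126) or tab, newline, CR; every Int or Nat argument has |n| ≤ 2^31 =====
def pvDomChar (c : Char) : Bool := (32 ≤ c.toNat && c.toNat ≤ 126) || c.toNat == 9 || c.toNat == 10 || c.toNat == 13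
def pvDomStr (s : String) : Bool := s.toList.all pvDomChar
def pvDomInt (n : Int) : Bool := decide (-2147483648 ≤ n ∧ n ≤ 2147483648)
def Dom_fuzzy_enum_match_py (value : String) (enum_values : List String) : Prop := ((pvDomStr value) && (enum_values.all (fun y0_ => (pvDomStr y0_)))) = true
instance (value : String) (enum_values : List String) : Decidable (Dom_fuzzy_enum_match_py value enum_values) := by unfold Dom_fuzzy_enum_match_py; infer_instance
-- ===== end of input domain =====

-- B merges A's two passes into one (exact match returns eagerly, first substring
-- candidate remembered), normalising each element once instead of twice.
-- The isinstance guards of the Python are vacuous under the String typing and are dropped.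

-- ===== PORT A =====
-- norm = v.lower().strip().replace("_", " ")  (shared by both ports)
def pvNorm (s : String) : String :=
  PySem.Str.replace (PySem.Str.strip (PySem.Str.lower s)) "_" " "

-- Pass 1: for ev in enum_values: if ev.lower().strip().replace(...) == norm: return ev
def pvPass1 (norm : String) : List String → Option String
  | [] => none
  | ev :: rest => if pvNorm ev == norm then some ev else pvPass1 norm rest

-- Pass 2: for ev in enum_values: ev_norm = …; if norm in ev_norm or ev_norm in norm: return ev
def pvPass2 (norm : String) : List String → Option String
  | [] => none
  | ev :: rest =>
    let ev_norm := pvNorm ev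
    if PySem.Str.isIn norm ev_norm || PySem.Str.isIn ev_norm norm then some ev
    else pvPass2 norm rest

def fuzzy_enum_match_py (value : String) (enum_values : List String) : Option String :=
  let norm := pvNorm value
  match pvPass1 norm enum_values with
  | some ev => some ev
  | none => pvPass2 norm enum_values

-- ===== PORT B =====
-- single loop: candidate accumulator, exact match returns immediately
def pvLoopB (norm : String) (candidate : Option String) : List String → Option String
  | [] => candidate
  | ev :: rest =>
    let ev_norm := pvNorm ev
    if ev_norm == norm then some ev
    else if candidate.isNone && (PySem.Str.isIn norm ev_norm || PySem.Str.isIn ev_norm norm) then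
      pvLoopB norm (some ev) rest
    else
      pvLoopB norm candidate rest

def fuzzy_enum_match_py_alt (value : String) (enum_values : List String) : Option String :=
  pvLoopB (pvNorm value) none enum_values

-- ===== PRECONDITION & SPEC =====
def Spec_fuzzy_enum_match_py (value : String) (enum_values : List String) (out : Option String) : Prop := out = fuzzy_enum_match_py_alt value enum_values
instance (value : String) (enum_values : List String) (out : Option String) : Decidable (Spec_fuzzy_enum_match_py value enum_values out) := by unfold Spec_fuzzy_enum_match_py; infer_instance

-- ===== CLAIM (what is proved, stated in full; the proofs are below) =====
def Claim_equal_fuzzy_enum_match_py : Prop := ∀ (value : String) (enum_values : List String), Dom_fuzzy_enum_match_py value enum_values → Spec_fuzzy_enum_match_py value enum_values (fuzzy_enum_match_py value enum_values)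

-- ===== LEMMAS AND PROOFS =====

-- Loop invariant: the one-pass loop with accumulator `cand` equals
-- "first exact match, else cand, else first substring match".
theorem pvLoopB_eq (norm : String) (l : List String) (cand : Option String) :
    pvLoopB norm cand l =
      match pvPass1 norm l with
      | some ev => some ev
      | none => match cand with
                | some c => some c
                | none => pvPass2 norm l := by
  induction l generalizing cand with
  | nil => cases cand <;> simp [pvLoopB, pvPass1, pvPass2]
  | cons ev rest ih =>
    cases hx : (pvNorm ev == norm) with
    | true => simp only [pvLoopB, pvPass1, hx, if_pos]
    | false =>
      cases hs : (PySem.Str.isIn norm (pvNorm ev) || PySem.Str.isIn (pvNorm ev) norm) with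
      | true =>
        cases cand <;>
          simp only [pvLoopB, pvPass1, pvPass2, hx, hs, ih, Bool.false_eq_true, if_false,
            Option.isNone_none, Bool.true_and, if_true, Option.isNone_some, Bool.false_and]
      | false =>
        cases cand <;>
          simp only [pvLoopB, pvPass1, pvPass2, hx, hs, ih, Bool.false_eq_true, if_false,
            Option.isNone_none, Bool.true_and, Option.isNone_some, Bool.false_and]

-- ===== VERDICT (by name: the statement is the Claim_ definition above) =====
theorem fuzzy_enum_match_py_spec : Claim_equal_fuzzy_enum_match_py := by
  intro value enum_values _
  unfold Spec_fuzzy_enum_match_py fuzzy_enum_match_py fuzzy_enum_match_py_alt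
  rw [pvLoopB_eq]
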